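-- pv_equiv track=rewrite | github.com/Elenabozhko/python | task_2_5.py | ascii_simbols
-- ===== SOURCE A (Python) =====
-- def ascii_simbols(num=32, counter=0, rezult=''):
--     if num == 128:
--         return rezult
--     else:
--         rezult += f'{num} - {chr(num)} '
--         num += 1
--         counter += 1
--         if counter == 10:
--             rezult += '\n'
--             counter = 0
--         return ascii_simbols(num, counter, rezult)
-- ===== SOURCE B (Python) =====
-- def ascii_simbols(num=32, counter=0, rezult=''):
--     for n in range(num, 128):
--         rezult += f'{n} - {chr(n)} '
--         counter += 1
--         if counter == 10:
--             rezult += '\n'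
--             counter = 0
--     return rezult
-- ===== Notes on version B (the rewrite author's own statement) =====
-- stated objective: idiomatic
-- what changed: Replaced the tail recursion that re-calls the function with fresh arguments by a plain for-loop over range(num, 128) accumulating the string; Pre_ excludes num < 0 (chr raises ValueError in both) and num > 128 (A hits RecursionError, B would return rezult unchanged).
import Mathlib
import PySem

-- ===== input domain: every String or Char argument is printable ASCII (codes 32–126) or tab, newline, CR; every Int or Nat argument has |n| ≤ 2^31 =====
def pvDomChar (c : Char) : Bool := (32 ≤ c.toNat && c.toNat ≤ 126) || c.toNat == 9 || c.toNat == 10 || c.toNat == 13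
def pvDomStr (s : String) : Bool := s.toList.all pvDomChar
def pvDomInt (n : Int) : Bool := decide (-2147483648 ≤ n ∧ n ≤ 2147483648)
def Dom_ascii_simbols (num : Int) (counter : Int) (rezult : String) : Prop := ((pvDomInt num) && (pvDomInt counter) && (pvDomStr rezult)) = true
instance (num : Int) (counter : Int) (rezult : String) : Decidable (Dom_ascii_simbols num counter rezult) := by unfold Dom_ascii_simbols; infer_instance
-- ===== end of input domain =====

-- B replaces A's tail recursion by an idiomatic for-loop over range(num, 128) (objective: idiomatic).

-- ===== PORT A =====
-- f'{n} - {chr(n)} '  (this f-string appears verbatim in both Pythons)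
def pvPiece (n : Int) : String :=
  PySem.Int.toStr n ++ " - " ++ String.singleton (Char.ofNat n.toNat) ++ " "

-- A's tail recursion, with fuel (128 - num).toNat making the descent structural; inside
-- Pre_ the fuel is exactly the number of recursive calls A makes.
def asciiGo : Nat → Int → Int → String → String
  | 0, _, _, rezult => rezult
  | fuel+1, num, counter, rezult =>
    if num = 128 then rezult
    else
      let rezult := rezult ++ pvPiece num
      let num := num + 1
      let counter := counter + 1
      if counter = 10 then asciiGo fuel num 0 (rezult ++ "\n")
      else asciiGo fuel num counter rezult

def ascii_simbols (num : Int) (counter : Int) (rezult : String) : String :=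
  asciiGo (128 - num).toNat num counter rezult

-- ===== PORT B =====
-- B's for-loop over range(num, 128) carrying the (counter, rezult) loop state.
def ascii_simbols_alt (num : Int) (counter : Int) (rezult : String) : String :=
  ((PySem.List.pyRange num 128 1).foldl
    (fun (st : Int × String) n =>
      let rezult := st.2 ++ pvPiece n
      let counter := st.1 + 1
      if counter = 10 then (0, rezult ++ "\n") else (counter, rezult))
    (counter, rezult)).2

-- ===== PRECONDITION & SPEC =====
-- Pre_: A terminates only for num ≤ 128 (above 128 the recursion never reaches its base
-- case: RecursionError) and chr(num) needs 0 ≤ num (ValueError in both programs);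
-- counter and rezult are unconstrained.
def Pre_ascii_simbols (num : Int) (counter : Int) (rezult : String) : Prop :=
  0 ≤ num ∧ num ≤ 128
instance (num : Int) (counter : Int) (rezult : String) : Decidable (Pre_ascii_simbols num counter rezult) := by unfold Pre_ascii_simbols; infer_instance
def pvWitness_ascii_simbols : Int × Int × String := (120, 3, "x")


def Spec_ascii_simbols (num : Int) (counter : Int) (rezult : String) (out : String) : Prop := out = ascii_simbols_alt num counter rezult
instance (num : Int) (counter : Int) (rezult : String) (out : String) : Decidable (Spec_ascii_simbols num counter rezult out) := by unfold Spec_ascii_simbols; infer_instance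

-- ===== CLAIM (what is proved, stated in full; the proofs are below) =====
def Claim_equal_ascii_simbols : Prop := ∀ (num : Int) (counter : Int) (rezult : String), Dom_ascii_simbols num counter rezult → Pre_ascii_simbols num counter rezult → Spec_ascii_simbols num counter rezult (ascii_simbols num counter rezult)

-- ===== LEMMAS AND PROOFS =====

lemma asciiGo_eq_fold : ∀ (fuel : Nat) (num counter : Int) (rezult : String),
    fuel = (128 - num).toNat → num ≤ 128 →
    asciiGo fuel num counter rezult = ascii_simbols_alt num counter rezult := by
  intro fuel
  induction fuel with
  | zero =>
    intro num counter rezult hf h1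
    have h128 : num = 128 := by omega
    subst h128
    simp [asciiGo, ascii_simbols_alt, PySem.List.pyRange_one_eq_nil (le_refl (128:Int))]
  | succ n ih =>
    intro num counter rezult hf h1
    have hlt : num < 128 := by omega
    simp only [asciiGo]
    rw [if_neg (by omega)]
    unfold ascii_simbols_alt
    rw [PySem.List.pyRange_one_cons hlt, List.foldl_cons]
    by_cases hc : counter + 1 = 10
    · rw [if_pos hc]
      simp only [hc]
      exact ih (num+1) 0 _ (by omega) (by omega)
    · rw [if_neg hc]
      simp only [if_neg hc]
      exact ih (num+1) (counter+1) _ (by omega) (by omega)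

-- ===== VERDICT (by name: the statement is the Claim_ definition above) =====
theorem ascii_simbols_spec : Claim_equal_ascii_simbols := by
  intro num counter rezult _ hpre
  unfold Spec_ascii_simbols ascii_simbols
  exact asciiGo_eq_fold _ num counter rezult rfl hpre.2
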